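-- pv_equiv track=rewrite | github.com/ahash27/langgraph-project | app/agents/validator_agent.py | _get_passed_checks
-- ===== SOURCE A (Python) =====
-- from typing import List
--
-- def _get_passed_checks(issues: List[str]) -> List[str]:
--     """Get list of checks that passed"""
--     all_checks = [
--         "format_check",
--         "completeness_check",
--         "consistency_check",
--         "confidence_check"
--     ]
--
--     # Simple heuristic - checks pass if no related issues
--     passed = []
--     for check in all_checks:
--         if not any(check.split("_")[0] in issue.lower() for issue in issues):
--             passed.append(check)
--
--     return passed
-- ===== SOURCE B (Python) =====
-- from typing import List
--
-- def _get_passed_checks(issues: List[str]) -> List[str]: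
--     """Get list of checks that passed"""
--     pairs = [
--         ("format", "format_check"),
--         ("completeness", "completeness_check"),
--         ("consistency", "consistency_check"),
--         ("confidence", "confidence_check"),
--     ]
--     matched = set()
--     for issue in issues:
--         low = issue.lower()
--         for kw, chk in pairs:
--             if kw in low:
--                 matched.add(chk)
--     return [chk for _, chk in pairs if chk not in matched]
-- ===== Notes on version B (the rewrite author's own statement) =====
-- stated objective: faster
-- what changed: One pass over issues lowercasing each issue once and accumulating the set of failed checks, then a single filter over all_checks, instead of re-scanning and re-lowercasing all issues once per check (and re-splitting the check name per comparison).
import Mathlib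
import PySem

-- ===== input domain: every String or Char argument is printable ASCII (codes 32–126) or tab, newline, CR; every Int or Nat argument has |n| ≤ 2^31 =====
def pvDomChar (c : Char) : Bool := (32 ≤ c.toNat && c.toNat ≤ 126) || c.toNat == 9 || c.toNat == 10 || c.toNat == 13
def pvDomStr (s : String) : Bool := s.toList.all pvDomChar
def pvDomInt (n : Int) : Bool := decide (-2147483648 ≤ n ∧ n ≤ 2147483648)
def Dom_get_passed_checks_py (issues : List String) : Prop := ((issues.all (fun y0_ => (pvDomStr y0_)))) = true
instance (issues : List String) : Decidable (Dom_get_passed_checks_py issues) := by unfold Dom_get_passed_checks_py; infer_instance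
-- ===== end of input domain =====

-- B: one pass over issues accumulating the set of failed checks, then one filter over all_checks (simpler; A re-scans all issues per check).

-- ===== PORT A =====
-- check.split("_"): sep "_" ≠ "" so split? is some, and the result is never empty so pyGet? at 0 is some; the .getD are exact here
def get_passed_checks_py (issues : List String) : List String :=
  let all_checks := ["format_check", "completeness_check", "consistency_check", "confidence_check"]
  let passed := all_checks.foldl (fun passed check =>
    if !(issues.any (fun issue =>
        PySem.Str.isIn ((PySem.List.pyGet? ((PySem.Str.split? check "_").getD []) 0).getD "") (PySem.Str.lower issue)))
    then passed ++ [check] else passed) []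
  passed

-- ===== PORT B =====
def pvPairs : List (String × String) :=
  [("format", "format_check"), ("completeness", "completeness_check"),
   ("consistency", "consistency_check"), ("confidence", "confidence_check")]

def get_passed_checks_py_alt (issues : List String) : List String :=
  let matched := issues.foldl (fun m issue =>
    let low := PySem.Str.lower issue
    pvPairs.foldl (fun m p => if PySem.Str.isIn p.1 low then PySem.Set.add m p.2 else m) m)
    PySem.Set.empty
  (pvPairs.map Prod.snd).filter (fun chk => !(PySem.Set.contains matched chk))

-- ===== PRECONDITION & SPEC =====
def Spec_get_passed_checks_py (issues : List String) (out : List String) : Prop := out = get_passed_checks_py_alt issues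
instance (issues : List String) (out : List String) : Decidable (Spec_get_passed_checks_py issues out) := by unfold Spec_get_passed_checks_py; infer_instance

-- ===== CLAIM (what is proved, stated in full; the proofs are below) =====
def Claim_equal_get_passed_checks_py : Prop := ∀ (issues : List String), Dom_get_passed_checks_py issues → Spec_get_passed_checks_py issues (get_passed_checks_py issues)

-- ===== LEMMAS AND PROOFS =====

-- membership of each check in the accumulated set after one issue's inner loop
theorem mem_inner (m : PySem.Set String) (low : String) (chk : String)
    (hchk : chk ∈ pvPairs.map Prod.snd) :
    (chk ∈ pvPairs.foldl (fun m p => if PySem.Str.isIn p.1 low then PySem.Set.add m p.2 else m) m) ↔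
      chk ∈ m ∨ ∃ kw, (kw, chk) ∈ pvPairs ∧ PySem.Str.isIn kw low = true := by
  simp only [pvPairs, List.map, List.mem_cons, List.not_mem_nil, or_false] at hchk
  simp only [pvPairs, List.foldl]
  rcases hchk with h | h | h | h <;> subst h <;>
    split_ifs <;>
      simp_all [PySem.Set.mem_add, Prod.ext_iff]

theorem mem_fold (issues : List String) (m : PySem.Set String) (chk : String)
    (hchk : chk ∈ pvPairs.map Prod.snd) :
    (chk ∈ issues.foldl (fun m issue =>
        pvPairs.foldl (fun m p => if PySem.Str.isIn p.1 (PySem.Str.lower issue) then PySem.Set.add m p.2 else m) m) m) ↔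
      chk ∈ m ∨ ∃ issue ∈ issues, ∃ kw, (kw, chk) ∈ pvPairs ∧ PySem.Str.isIn kw (PySem.Str.lower issue) = true := by
  induction issues generalizing m with
  | nil => simp
  | cons i rest ih =>
    simp only [List.foldl_cons, ih _ , mem_inner _ _ _ hchk, List.mem_cons]
    constructor
    · rintro ((h | ⟨kw, hk, hi⟩) | ⟨j, hj, kw, hk, hi⟩)
      · exact Or.inl h
      · exact Or.inr ⟨i, Or.inl rfl, kw, hk, hi⟩
      · exact Or.inr ⟨j, Or.inr hj, kw, hk, hi⟩
    · rintro (h | ⟨j, (rfl | hj), kw, hk, hi⟩)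
      · exact Or.inl (Or.inl h)
      · exact Or.inl (Or.inr ⟨kw, hk, hi⟩)
      · exact Or.inr ⟨j, hj, kw, hk, hi⟩

-- for each of the four checks: A's any-condition equals B's set-membership
theorem cond_eq (issues : List String) (kw chk : String)
    (hmem : (kw, chk) ∈ pvPairs)
    (huniq : ∀ p ∈ pvPairs, p.2 = chk → p.1 = kw) :
    (PySem.Set.contains (issues.foldl (fun m issue =>
        pvPairs.foldl (fun m p => if PySem.Str.isIn p.1 (PySem.Str.lower issue) then PySem.Set.add m p.2 else m) m)
        PySem.Set.empty) chk)
      = issues.any (fun issue => PySem.Str.isIn kw (PySem.Str.lower issue)) := by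
  have hchk : chk ∈ pvPairs.map Prod.snd := List.mem_map_of_mem hmem
  rcases h : issues.any (fun issue => PySem.Str.isIn kw (PySem.Str.lower issue)) with _ | _
  · simp only [List.any_eq_false] at h
    rw [Bool.eq_false_iff, Ne, PySem.Set.contains_iff, mem_fold _ _ _ hchk]
    rintro (hm | ⟨i, hi, kw', hk, hin⟩)
    · simp [PySem.Set.empty] at hm
    · have := huniq _ hk rfl; subst this; exact absurd hin (by simpa using h i hi)
  · simp only [List.any_eq_true] at h
    obtain ⟨i, hi, hin⟩ := h
    rw [PySem.Set.contains_iff, mem_fold _ _ _ hchk]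
    exact Or.inr ⟨i, hi, kw, hmem, by simpa using hin⟩

-- ===== VERDICT (by name: the statement is the Claim_ definition above) =====
set_option maxHeartbeats 1000000 in
theorem get_passed_checks_py_spec : Claim_equal_get_passed_checks_py := by
  intro issues _
  show get_passed_checks_py issues = get_passed_checks_py_alt issues
  unfold get_passed_checks_py get_passed_checks_py_alt
  have h1 := cond_eq issues "format" "format_check" (by decide) (by decide)
  have h2 := cond_eq issues "completeness" "completeness_check" (by decide) (by decide)
  have h3 := cond_eq issues "consistency" "consistency_check" (by decide) (by decide)
  have h4 := cond_eq issues "confidence" "confidence_check" (by decide) (by decide)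
  have e1 : (PySem.List.pyGet? ((PySem.Str.split? "format_check" "_").getD []) 0).getD "" = "format" := by decide
  have e2 : (PySem.List.pyGet? ((PySem.Str.split? "completeness_check" "_").getD []) 0).getD "" = "completeness" := by decide
  have e3 : (PySem.List.pyGet? ((PySem.Str.split? "consistency_check" "_").getD []) 0).getD "" = "consistency" := by decide
  have e4 : (PySem.List.pyGet? ((PySem.Str.split? "confidence_check" "_").getD []) 0).getD "" = "confidence" := by decide
  simp only [pvPairs, List.foldl_cons, List.foldl_nil, List.map_cons, List.map_nil,
    List.filter_cons, List.filter_nil] at h1 h2 h3 h4 ⊢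
  simp only [e1, e2, e3, e4, h1, h2, h3, h4]
  split_ifs <;> simp_all
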